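-- pv_equiv track=rewrite | github.com/uesugitorachiyo/secure-agent-profile | secure_agent_profile/workflow.py | _ecosystems
-- ===== SOURCE A (Python) =====
-- def _ecosystems(manifests: list[str]) -> list[str]:
--     ecosystems = []
--     if any(path in manifests for path in ("pyproject.toml", "requirements.txt")):
--         ecosystems.append("python")
--     if "package.json" in manifests:
--         ecosystems.append("node")
--     if "Cargo.toml" in manifests:
--         ecosystems.append("rust")
--     return ecosystems
-- ===== SOURCE B (Python) =====
-- _TRIGGER = {
--     "pyproject.toml": "python",
--     "requirements.txt": "python",
--     "package.json": "node",
--     "Cargo.toml": "rust",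
-- }
-- _ORDER = ("python", "node", "rust")
--
--
-- def _ecosystems(manifests: list[str]) -> list[str]:
--     # Single pass over manifests: look each file up in a trigger->ecosystem
--     # dict, collect the hit ecosystems in a set, then emit them in the
--     # canonical order.
--     found = set()
--     for m in manifests:
--         eco = _TRIGGER.get(m)
--         if eco is not None:
--             found.add(eco)
--     return [e for e in _ORDER if e in found]
-- ===== Notes on version B (the rewrite author's own statement) =====
-- stated objective: alternative
-- what changed: Instead of testing each hardcoded trigger file against the manifests list, B scans the manifests once, maps each file through a trigger->ecosystem dict into a found-set, and emits the canonical order filtered by that set.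
import Mathlib
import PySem

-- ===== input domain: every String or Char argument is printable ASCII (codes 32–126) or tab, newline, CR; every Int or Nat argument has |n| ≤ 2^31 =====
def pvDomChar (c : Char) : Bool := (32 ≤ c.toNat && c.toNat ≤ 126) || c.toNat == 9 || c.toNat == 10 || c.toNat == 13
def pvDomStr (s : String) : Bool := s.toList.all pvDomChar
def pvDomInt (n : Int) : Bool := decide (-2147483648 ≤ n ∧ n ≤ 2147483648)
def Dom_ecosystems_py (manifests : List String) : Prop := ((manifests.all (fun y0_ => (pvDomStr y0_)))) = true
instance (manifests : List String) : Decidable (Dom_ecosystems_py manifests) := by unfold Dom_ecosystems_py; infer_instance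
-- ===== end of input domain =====

-- B scans the manifests once through a trigger->ecosystem dict into a found-set and emits the canonical order filtered by it (alternative decomposition; same cost).


-- ===== PORT A =====
-- literal transliteration of A: start from [], three ifs, each appending one name
def ecosystems_py (manifests : List String) : List String :=
  let ecosystems : List String := []
  let ecosystems :=
    if ["pyproject.toml", "requirements.txt"].any (fun path => manifests.contains path)
    then ecosystems ++ ["python"] else ecosystems
  let ecosystems :=
    if manifests.contains "package.json" then ecosystems ++ ["node"] else ecosystems
  let ecosystems :=
    if manifests.contains "Cargo.toml" then ecosystems ++ ["rust"] else ecosystems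
  ecosystems

-- ===== PORT B =====
-- the module-level _TRIGGER dict and _ORDER tuple of Source B
def triggerDict : PySem.Dict String String :=
  PySem.Dict.mk
    [("pyproject.toml", "python"), ("requirements.txt", "python"),
     ("package.json", "node"), ("Cargo.toml", "rust")]

def ecoOrder : List String := ["python", "node", "rust"]

-- B: one fold over manifests building the found-set, then filter the canonical order
def ecosystems_py_alt (manifests : List String) : List String :=
  let found : PySem.Set String :=
    manifests.foldl (fun s m =>
      match PySem.Dict.get? triggerDict m with
      | some eco => PySem.Set.add s eco
      | none => s) PySem.Set.empty
  ecoOrder.filter (fun e => PySem.Set.contains found e)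

-- ===== PRECONDITION & SPEC =====
def Spec_ecosystems_py (manifests : List String) (out : List String) : Prop := out = ecosystems_py_alt manifests
instance (manifests : List String) (out : List String) : Decidable (Spec_ecosystems_py manifests out) := by unfold Spec_ecosystems_py; infer_instance

-- ===== CLAIM (what is proved, stated in full; the proofs are below) =====
def Claim_equal_ecosystems_py : Prop := ∀ (manifests : List String), Dom_ecosystems_py manifests → Spec_ecosystems_py manifests (ecosystems_py manifests)

-- ===== LEMMAS AND PROOFS =====
theorem mem_found (ms : List String) (s : PySem.Set String) (e : String) :
    (e ∈ ms.foldl (fun s m =>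
        match PySem.Dict.get? triggerDict m with
        | some eco => PySem.Set.add s eco
        | none => s) s) ↔ e ∈ s ∨ ∃ m ∈ ms, PySem.Dict.get? triggerDict m = some e := by
  induction ms generalizing s with
  | nil => simp
  | cons m ms ih =>
    simp only [List.foldl_cons]
    cases h : PySem.Dict.get? triggerDict m with
    | none =>
      rw [ih]
      simp only [List.mem_cons]
      constructor
      · rintro (hs | ⟨x, hx, hg⟩)
        · exact Or.inl hs
        · exact Or.inr ⟨x, Or.inr hx, hg⟩
      · rintro (hs | ⟨x, (rfl | hx), hg⟩)
        · exact Or.inl hs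
        · rw [h] at hg; cases hg
        · exact Or.inr ⟨x, hx, hg⟩
    | some eco =>
      rw [ih]
      simp only [PySem.Set.mem_add, List.mem_cons]
      constructor
      · rintro ((hs | rfl) | ⟨x, hx, hg⟩)
        · exact Or.inl hs
        · exact Or.inr ⟨m, Or.inl rfl, h⟩
        · exact Or.inr ⟨x, Or.inr hx, hg⟩
      · rintro (hs | ⟨x, (rfl | hx), hg⟩)
        · exact Or.inl (Or.inl hs)
        · rw [h] at hg; exact Or.inl (Or.inr (by injection hg with h'; exact h'.symm))
        · exact Or.inr ⟨x, hx, hg⟩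

theorem get?_trigger (m : String) :
    PySem.Dict.get? triggerDict m =
      if "pyproject.toml" = m then some "python"
      else if "requirements.txt" = m then some "python"
      else if "package.json" = m then some "node"
      else if "Cargo.toml" = m then some "rust"
      else none := by
  simp only [triggerDict, PySem.Dict.get?_mk_cons, beq_iff_eq]
  rw [show ({ items := [] } : PySem.Dict String String).get? m = none from rfl]

theorem found_contains (ms : List String) (e : String) :
    (ms.foldl (fun s m =>
        match PySem.Dict.get? triggerDict m with
        | some eco => PySem.Set.add s eco
        | none => s) PySem.Set.empty).contains e = true ↔
      ∃ m ∈ ms, PySem.Dict.get? triggerDict m = some e := by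
  simp only [PySem.Set.contains, List.contains_iff_mem, mem_found]
  simp [PySem.Set.empty]

theorem exists_trigger (ms : List String) (e : String) :
    (∃ m ∈ ms, PySem.Dict.get? triggerDict m = some e) ↔
      ("pyproject.toml" ∈ ms ∧ e = "python") ∨ ("requirements.txt" ∈ ms ∧ e = "python")
      ∨ ("package.json" ∈ ms ∧ e = "node") ∨ ("Cargo.toml" ∈ ms ∧ e = "rust") := by
  simp only [get?_trigger]
  constructor
  · rintro ⟨m, hm, hg⟩
    split_ifs at hg with h1 h2 h3 h4 <;>
      injection hg with h' <;> subst h' <;> subst_vars <;> tauto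
  · rintro (⟨hm, rfl⟩ | ⟨hm, rfl⟩ | ⟨hm, rfl⟩ | ⟨hm, rfl⟩)
    · exact ⟨_, hm, by simp⟩
    · exact ⟨_, hm, by simp⟩
    · exact ⟨_, hm, by simp⟩
    · exact ⟨_, hm, by simp⟩

theorem ecosystems_eq (ms : List String) :
    ecosystems_py ms = ecosystems_py_alt ms := by
  unfold ecosystems_py ecosystems_py_alt ecoOrder
  have kp := (found_contains ms "python").trans (exists_trigger ms "python")
  have kn := (found_contains ms "node").trans (exists_trigger ms "node")
  have kr := (found_contains ms "rust").trans (exists_trigger ms "rust")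
  simp only [PySem.Set.contains] at *
  by_cases h1a : ("pyproject.toml" : String) ∈ ms <;>
  by_cases h1b : ("requirements.txt" : String) ∈ ms <;>
  by_cases h2 : ("package.json" : String) ∈ ms <;>
  by_cases h3 : ("Cargo.toml" : String) ∈ ms <;>
  simp [h1a, h1b, h2, h3, List.filter] at * <;>
  simp [kp, kn, kr]

-- ===== VERDICT (by name: the statement is the Claim_ definition above) =====
theorem ecosystems_py_spec : Claim_equal_ecosystems_py := by
  intro m _
  exact ecosystems_eq m
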